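-- pv_equiv track=rewrite | github.com/JonathanArrance/PyPractice | basics/forloop.py | sorted_odds_evens
-- ===== SOURCE A (Python) =====
-- def sorted_odds_evens(nums):
--     #create a dict that holds the sorted values from least to greates and eliminate dups
--     # {'odd':[sorted],'even':[sorted]}
--     odds = []
--     evens = []
--     for n in nums:
--         if (n%2) == 0:
--             if n not in evens:
--                 evens.append(n)
--         else:
--             if n not in odds:
--                 odds.append(n)
--
--     out = {'odds':sorted(odds),'evens':sorted(evens)}
--     return f'The sorted evens and odds are {str(out)}'
-- ===== SOURCE B (Python) =====
-- def sorted_odds_evens(nums):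
--     s = sorted(set(nums))
--     out = {'odds': [n for n in s if n % 2],
--            'evens': [n for n in s if n % 2 == 0]}
--     return f'The sorted evens and odds are {str(out)}'
-- ===== Notes on version B (the rewrite author's own statement) =====
-- stated objective: faster
-- what changed: Replaces the partition-into-two-dedup-lists loop (dedup by linear membership scans) followed by two sorts with a single sort of set(nums) followed by two parity filters of that one sorted sequence.
import Mathlib
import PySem

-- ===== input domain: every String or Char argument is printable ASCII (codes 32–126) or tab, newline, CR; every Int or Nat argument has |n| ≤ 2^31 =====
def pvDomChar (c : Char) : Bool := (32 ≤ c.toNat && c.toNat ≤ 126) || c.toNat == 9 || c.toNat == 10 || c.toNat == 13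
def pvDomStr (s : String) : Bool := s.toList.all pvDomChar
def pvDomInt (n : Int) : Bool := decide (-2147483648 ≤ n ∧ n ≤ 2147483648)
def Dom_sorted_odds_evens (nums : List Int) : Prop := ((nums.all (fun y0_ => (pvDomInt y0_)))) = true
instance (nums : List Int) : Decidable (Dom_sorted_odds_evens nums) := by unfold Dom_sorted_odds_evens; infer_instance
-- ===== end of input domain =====

-- B replaces A's partition-then-dedup-then-sort-each loop with sort(set(nums)) once, then two parity filters (simpler decomposition).

-- str([...]) for a list of ints, Python's repr, e.g. "[1, 2]" (shared rendering of the identical f-string of both programs)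
def pyIntListRepr (xs : List Int) : String :=
  "[" ++ String.intercalate ", " (xs.map PySem.Int.toStr) ++ "]"

-- ===== PORT A =====
def sorted_odds_evens (nums : List Int) : String :=
  -- odds = []; evens = []; for n in nums: ...
  let oe := nums.foldl (fun (st : List Int × List Int) n =>
    if PySem.Int.mod n 2 = 0 then
      (st.1, if st.2.contains n then st.2 else st.2 ++ [n])
    else
      (if st.1.contains n then st.1 else st.1 ++ [n], st.2)) ([], [])
  -- out = {'odds': sorted(odds), 'evens': sorted(evens)}; return f'...{str(out)}'
  "The sorted evens and odds are {'odds': "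
    ++ pyIntListRepr (PySem.List.sorted oe.1 (fun x => x) false)
    ++ ", 'evens': "
    ++ pyIntListRepr (PySem.List.sorted oe.2 (fun x => x) false)
    ++ "}"

-- ===== PORT B =====
def sorted_odds_evens_alt (nums : List Int) : String :=
  -- s = sorted(set(nums))
  let s := PySem.List.sorted (PySem.Set.ofList nums) (fun x => x) false
  -- out = {'odds': [n for n in s if n % 2], 'evens': [n for n in s if n % 2 == 0]}
  let odds := s.filter (fun n => PySem.Int.mod n 2 ≠ 0)
  let evens := s.filter (fun n => PySem.Int.mod n 2 = 0)
  "The sorted evens and odds are {'odds': "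
    ++ pyIntListRepr odds
    ++ ", 'evens': "
    ++ pyIntListRepr evens
    ++ "}"

-- ===== PRECONDITION & SPEC =====
def Spec_sorted_odds_evens (nums : List Int) (out : String) : Prop := out = sorted_odds_evens_alt nums
instance (nums : List Int) (out : String) : Decidable (Spec_sorted_odds_evens nums out) := by unfold Spec_sorted_odds_evens; infer_instance

-- ===== CLAIM (what is proved, stated in full; the proofs are below) =====
def Claim_equal_sorted_odds_evens : Prop := ∀ (nums : List Int), Dom_sorted_odds_evens nums → Spec_sorted_odds_evens nums (sorted_odds_evens nums)

-- ===== LEMMAS AND PROOFS =====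

-- A's loop splits nums by parity, deduplicating each bucket by Set.add
theorem pv_fold_split (nums : List Int) (o e : List Int) :
    nums.foldl (fun (st : List Int × List Int) n =>
      if PySem.Int.mod n 2 = 0 then
        (st.1, if st.2.contains n then st.2 else st.2 ++ [n])
      else
        (if st.1.contains n then st.1 else st.1 ++ [n], st.2)) (o, e)
    = ((nums.filter (fun n => PySem.Int.mod n 2 ≠ 0)).foldl PySem.Set.add o,
       (nums.filter (fun n => PySem.Int.mod n 2 = 0)).foldl PySem.Set.add e) := by
  induction nums generalizing o e with
  | nil => rfl
  | cons n t ih =>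
    by_cases h : PySem.Int.mod n 2 = 0
    · have hc1 : decide (PySem.Int.mod n 2 ≠ 0) = false := by
        simp only [h, ne_eq, not_true_eq_false, decide_false]
      have hc2 : decide (PySem.Int.mod n 2 = 0) = true := by
        simp only [h, decide_true]
      simp only [List.foldl_cons, List.filter_cons, hc1, hc2, if_true, if_false,
        if_pos h, Bool.false_eq_true]
      rw [ih]
      rfl
    · have hc1 : decide (PySem.Int.mod n 2 ≠ 0) = true := by
        simp only [ne_eq, h, not_false_eq_true, decide_true]
      have hc2 : decide (PySem.Int.mod n 2 = 0) = false := by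
        simp only [h, decide_false]
      simp only [List.foldl_cons, List.filter_cons, hc1, hc2, if_true, if_false,
        if_neg h, Bool.false_eq_true]
      rw [ih]
      rfl

-- sorting a first-occurrence dedup of (filter p nums) = filtering p out of sorted(set(nums))
theorem pv_sorted_dedup_filter (nums : List Int) (p : Int → Bool) :
    PySem.List.sorted ((nums.filter p).foldl PySem.Set.add []) (fun x => x) false
    = (PySem.List.sorted (PySem.Set.ofList nums) (fun x => x) false).filter p := by
  have hfoldl : (nums.filter p).foldl PySem.Set.add ([] : List Int)
      = PySem.Set.ofList (nums.filter p) := (PySem.Set.ofList_eq_foldl _).symm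
  set ys := (PySem.List.sorted (PySem.Set.ofList nums) (fun x => x) false).filter p with hys
  have hlt : (PySem.List.sorted (PySem.Set.ofList nums) (fun x => x) false).Pairwise (· < ·) :=
    PySem.List.sorted_ofList_pairwise_lt nums
  have hpair : ys.Pairwise (fun a b => a < b) := hlt.filter p
  have hnd : ys.Nodup := hpair.imp (fun h => ne_of_lt h)
  have hnd' : ((nums.filter p).foldl PySem.Set.add ([] : List Int)).Nodup := by
    rw [hfoldl]; exact PySem.Set.nodup_ofList _
  have hmem : ∀ x : Int, x ∈ ys ↔ x ∈ (nums.filter p).foldl PySem.Set.add ([] : List Int) := by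
    intro x
    rw [hfoldl]
    simp [hys, List.mem_filter, PySem.Set.mem_ofList, PySem.List.mem_sorted, and_comm]
  have hperm : ys.Perm ((nums.filter p).foldl PySem.Set.add ([] : List Int)) :=
    (List.perm_ext_iff_of_nodup hnd hnd').mpr hmem
  exact PySem.List.sorted_eq_of_perm_of_pairwise_lt _ ys (fun x => x) hperm hpair

-- ===== VERDICT (by name: the statement is the Claim_ definition above) =====
theorem sorted_odds_evens_spec : Claim_equal_sorted_odds_evens := by
  intro nums _
  simp only [Spec_sorted_odds_evens, sorted_odds_evens, sorted_odds_evens_alt,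
    pv_fold_split, pv_sorted_dedup_filter]
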